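-- pv_equiv track=rewrite | github.com/Muhammad-Saaaad/Health-FHIR-HL7-Processing-Engine-with-client-Simulator | InterfaceEngine/validation/hl7_validation.py | hl7_extract_paths
-- ===== SOURCE A (Python) =====
-- def hl7_extract_paths(segment) -> list:
--     """
--     Parse a single HL7 segment string and return all field/component/subcomponent paths.
--
--     Generates dot-notation paths such as:
--     - `PID-3` (simple field)
--     - `PID-5.1` (component within a field)
--     - `PID-5.1.2` (subcomponent within a component)
--
--     Args:
--         segment (str): A single HL7 segment string (e.g., "PID|1||12345^^^MR||Smith^John^A").
--
--     Returns:
--         tuple: (segment_type: str, paths: list[str])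
--             - `segment_type`: e.g., "PID", "MSH"
--             - `paths`: list of dot-notation path strings for all non-empty fields
--     """
--     paths = []
--
--     # for segment in segments[1:]
--     fields = segment.split('|')
--     segment_type = fields[0].strip() # PID etc.
--     for i , field in enumerate(fields[1:], start=1):
--         if not field:
--             continue
--         if '^' in field:
--             components = field.split('^')
--             for j, component in enumerate(components, start=1):
--                 if '&' in component:
--                     subcomponents = component.split('&')
--                     for k, subcomponent in enumerate(subcomponents, start=1):
--                         path = f"{segment_type}-{i}.{j}.{k}"
--                         paths.append(path)
--                 else:
--                     path = f"{segment_type}-{i}.{j}"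
--                     paths.append(path)
--         else:
--             path = f"{segment_type}-{i}"
--             paths.append(path)
--     return (segment_type, paths)
-- ===== SOURCE B (Python) =====
-- def hl7_extract_paths(segment) -> list:
--     def walk(prefix, value, delims):
--         if not delims or delims[0] not in value:
--             return [prefix]
--         out = []
--         for j, part in enumerate(value.split(delims[0]), start=1):
--             out.extend(walk(f"{prefix}.{j}", part, delims[1:]))
--         return out
--
--     fields = segment.split('|')
--     segment_type = fields[0].strip()
--     paths = []
--     for i, field in enumerate(fields[1:], start=1):
--         if field:
--             paths.extend(walk(f"{segment_type}-{i}", field, ['^', '&']))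
--     return (segment_type, paths)
-- ===== Notes on version B (the rewrite author's own statement) =====
-- stated objective: alternative
-- what changed: Replaced the three hard-coded nested loops over '^' and '&' by a single recursive walk over the delimiter hierarchy ['^','&'], extending the prefix with a 1-based index at each level.
import Mathlib
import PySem

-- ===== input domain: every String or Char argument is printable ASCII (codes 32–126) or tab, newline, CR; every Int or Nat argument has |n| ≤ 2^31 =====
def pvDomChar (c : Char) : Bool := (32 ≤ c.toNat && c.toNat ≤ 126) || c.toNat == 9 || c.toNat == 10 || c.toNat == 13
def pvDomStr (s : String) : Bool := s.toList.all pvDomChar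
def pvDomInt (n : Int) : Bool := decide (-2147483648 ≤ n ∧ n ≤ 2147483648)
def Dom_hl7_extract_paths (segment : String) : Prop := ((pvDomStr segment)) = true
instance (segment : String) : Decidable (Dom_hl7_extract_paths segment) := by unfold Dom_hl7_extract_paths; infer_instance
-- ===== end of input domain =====

-- B replaces A's three hard-coded nested '^'/'&' loops by one recursive walk over the delimiter hierarchy; objective: alternative decomposition.


-- ===== PORT A =====
-- s.split(sep) for a NONEMPTY sep (exact there; Str.split? is none only for sep = "")
def pySplit (s sep : String) : List String := (PySem.Str.split? s sep).getD []

def hl7_extract_paths (segment : String) : String × List String :=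
  let fields := pySplit segment "|"
  -- fields[0]: split always returns a non-empty list, so the 'headD ""' default is never used
  let segment_type := PySem.Str.strip (fields.headD "")
  let paths :=
    (PySem.List.enumerate (fields.drop 1) 1).foldl (fun paths p =>
      let i := p.1
      let field := p.2
      if field = "" then paths
      else if PySem.Str.isIn "^" field then
        (PySem.List.enumerate (pySplit field "^") 1).foldl (fun paths q =>
          let j := q.1
          let component := q.2
          if PySem.Str.isIn "&" component then
            (PySem.List.enumerate (pySplit component "&") 1).foldl (fun paths r =>
              paths ++ [segment_type ++ "-" ++ PySem.Int.toStr i ++ "." ++ PySem.Int.toStr j ++ "." ++ PySem.Int.toStr r.1]) paths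
          else paths ++ [segment_type ++ "-" ++ PySem.Int.toStr i ++ "." ++ PySem.Int.toStr j]) paths
      else paths ++ [segment_type ++ "-" ++ PySem.Int.toStr i]) []
  (segment_type, paths)

-- ===== PORT B =====
def hl7walk (pre : String) (value : String) (delims : List String) : List String :=
  match delims with
  | [] => [pre]
  | d :: rest =>
    if PySem.Str.isIn d value then
      (PySem.List.enumerate (pySplit value d) 1).foldl
        (fun out q => out ++ hl7walk (pre ++ "." ++ PySem.Int.toStr q.1) q.2 rest) []
    else [pre]

def hl7_extract_paths_alt (segment : String) : String × List String :=
  let fields := pySplit segment "|"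
  let segment_type := PySem.Str.strip (fields.headD "")
  let paths :=
    (PySem.List.enumerate (fields.drop 1) 1).foldl (fun paths p =>
      if p.2 = "" then paths
      else paths ++ hl7walk (segment_type ++ "-" ++ PySem.Int.toStr p.1) p.2 ["^", "&"]) []
  (segment_type, paths)

-- ===== PRECONDITION & SPEC =====
def Spec_hl7_extract_paths (segment : String) (out : String × List String) : Prop := out = hl7_extract_paths_alt segment
instance (segment : String) (out : String × List String) : Decidable (Spec_hl7_extract_paths segment out) := by unfold Spec_hl7_extract_paths; infer_instance

-- ===== CLAIM (what is proved, stated in full; the proofs are below) =====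
def Claim_equal_hl7_extract_paths : Prop := ∀ (segment : String), Dom_hl7_extract_paths segment → Spec_hl7_extract_paths segment (hl7_extract_paths segment)

-- ===== LEMMAS AND PROOFS =====

-- a map of singletons flattens to the map (used to line A's append-one-path loops up with the walk's normal form)
theorem map_eq_flatten_map_singleton {α β : Type} (l : List α) (f : α → β) :
    l.map f = (l.map (fun x => [f x])).flatten := by
  induction l with
  | nil => simp
  | cons a t ih => simp [ih]

-- simp normal form of the two-level walk
theorem hl7walk_norm (pre field : String) :
    hl7walk pre field ["^", "&"] =
      if PySem.Chars.isIn ['^'] field.toList = true then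
        ((PySem.List.enumerate (pySplit field "^") 1).map (fun q =>
          if PySem.Chars.isIn ['&'] q.2.toList = true then
            ((PySem.List.enumerate (pySplit q.2 "&") 1).map
              (fun r => [pre ++ "." ++ PySem.Int.toStr q.1 ++ "." ++ PySem.Int.toStr r.1])).flatten
          else [pre ++ "." ++ PySem.Int.toStr q.1])).flatten
      else [pre] := by
  simp [hl7walk]

-- A's per-field nested loops equal an append of the recursive walk
theorem hl7_field_eq (st : String) (i : Int) (field : String) (acc : List String) :
    (if PySem.Str.isIn "^" field then
        (PySem.List.enumerate (pySplit field "^") 1).foldl (fun paths q =>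
          if PySem.Str.isIn "&" q.2 then
            (PySem.List.enumerate (pySplit q.2 "&") 1).foldl (fun paths r =>
              paths ++ [st ++ "-" ++ PySem.Int.toStr i ++ "." ++ PySem.Int.toStr q.1 ++ "." ++ PySem.Int.toStr r.1]) paths
          else paths ++ [st ++ "-" ++ PySem.Int.toStr i ++ "." ++ PySem.Int.toStr q.1]) acc
      else acc ++ [st ++ "-" ++ PySem.Int.toStr i]) =
    acc ++ hl7walk (st ++ "-" ++ PySem.Int.toStr i) field ["^", "&"] := by
  rw [hl7walk_norm]
  by_cases h : PySem.Str.isIn "^" field = true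
  · have h' : PySem.Chars.isIn ['^'] field.toList = true := by simpa using h
    rw [if_pos h, if_pos h']
    calc (PySem.List.enumerate (pySplit field "^") 1).foldl (fun paths q =>
          if PySem.Str.isIn "&" q.2 then
            (PySem.List.enumerate (pySplit q.2 "&") 1).foldl (fun paths r =>
              paths ++ [st ++ "-" ++ PySem.Int.toStr i ++ "." ++ PySem.Int.toStr q.1 ++ "." ++ PySem.Int.toStr r.1]) paths
          else paths ++ [st ++ "-" ++ PySem.Int.toStr i ++ "." ++ PySem.Int.toStr q.1]) acc
        = (PySem.List.enumerate (pySplit field "^") 1).foldl (fun paths q =>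
            paths ++
              (if PySem.Chars.isIn ['&'] q.2.toList = true then
                ((PySem.List.enumerate (pySplit q.2 "&") 1).map
                  (fun r => [st ++ "-" ++ PySem.Int.toStr i ++ "." ++ PySem.Int.toStr q.1 ++ "." ++ PySem.Int.toStr r.1])).flatten
              else [st ++ "-" ++ PySem.Int.toStr i ++ "." ++ PySem.Int.toStr q.1])) acc := by
          apply PySem.List.foldl_congr_mem
          intro acc' q _
          by_cases hq : PySem.Str.isIn "&" q.2 = true
          · have hq' : PySem.Chars.isIn ['&'] q.2.toList = true := by simpa using hq
            rw [if_pos hq, if_pos hq', PySem.List.foldl_append_singleton_eq_map,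
               map_eq_flatten_map_singleton]
          · have hq' : ¬ PySem.Chars.isIn ['&'] q.2.toList = true := by simpa using hq
            rw [if_neg hq, if_neg hq']
      _ = acc ++ ((PySem.List.enumerate (pySplit field "^") 1).map (fun q =>
            if PySem.Chars.isIn ['&'] q.2.toList = true then
              ((PySem.List.enumerate (pySplit q.2 "&") 1).map
                (fun r => [st ++ "-" ++ PySem.Int.toStr i ++ "." ++ PySem.Int.toStr q.1 ++ "." ++ PySem.Int.toStr r.1])).flatten
            else [st ++ "-" ++ PySem.Int.toStr i ++ "." ++ PySem.Int.toStr q.1])).flatten := by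
          rw [PySem.List.foldl_append_eq_flatMap]
          simp [List.flatMap_def]
  · have h' : ¬ PySem.Chars.isIn ['^'] field.toList = true := by simpa using h
    rw [if_neg h, if_neg h']

-- ===== VERDICT (by name: the statement is the Claim_ definition above) =====
theorem hl7_extract_paths_spec : Claim_equal_hl7_extract_paths := by
  intro segment _
  unfold Spec_hl7_extract_paths hl7_extract_paths hl7_extract_paths_alt
  simp only
  congr 1
  apply PySem.List.foldl_congr_mem
  intro acc p _
  by_cases hf : p.2 = ""
  · simp [hf]
  · rw [if_neg hf, if_neg hf]
    exact hl7_field_eq (PySem.Str.strip ((pySplit segment "|").headD "")) p.1 p.2 acc
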